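-- pv_equiv track=rewrite | github.com/SereyvatanaUng/python-algorithm | 06_stack/exercises/03_remove_duplicate_letters.py | solve
-- ===== SOURCE A (Python) =====
-- def solve(S):
--     stack = []
--     temp = []
--
--     for s in S:
--         if s not in stack:
--             stack.append(s)
--         else:
--             while s != stack[-1]:
--                 temp.append(stack.pop())
--             stack.pop()
--             temp.reverse()
--             stack += temp
--             stack += [s]
--             temp = []
--
--     result = ",".join(stack)
--     return result
-- ===== SOURCE B (Python) =====
-- def solve(S):
--     seen = set()
--     result = []
--     for ch in reversed(S):
--         if ch not in seen:
--             seen.add(ch)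
--             result.append(ch)
--     result.reverse()
--     return ",".join(result)
-- ===== Notes on version B (the rewrite author's own statement) =====
-- stated objective: faster
-- what changed: Replaces the forward scan with an in-list membership test and a pop/temp/reverse relocation of duplicates by a single backward pass that keeps the first char seen from the right in a hash set, yielding the last-occurrence order directly.
import Mathlib
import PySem

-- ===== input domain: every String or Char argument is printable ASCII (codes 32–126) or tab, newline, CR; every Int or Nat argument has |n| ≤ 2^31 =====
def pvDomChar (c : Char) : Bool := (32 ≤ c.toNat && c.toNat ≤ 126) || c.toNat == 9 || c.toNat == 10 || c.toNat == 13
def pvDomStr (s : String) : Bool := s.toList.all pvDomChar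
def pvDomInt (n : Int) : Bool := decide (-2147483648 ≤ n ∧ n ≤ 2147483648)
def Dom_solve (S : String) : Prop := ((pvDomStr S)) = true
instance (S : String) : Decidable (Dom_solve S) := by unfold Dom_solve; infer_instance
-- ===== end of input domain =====

-- B replaces A's forward scan with quadratic in-list membership and pop/temp/reverse
-- relocation of duplicates by one backward pass keeping a hash set of chars already seen.

-- ===== PORT A =====
-- the inner `while s != stack[-1]: temp.append(stack.pop())`; fuel = stack length
-- guarantees totality (in Python the loop always finds c because c ∈ stack).
def relocLoop (fuel : Nat) (c : Char) (stack temp : List Char) : List Char × List Char :=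
  match fuel with
  | 0 => (stack, temp)
  | Nat.succ f =>
    match stack.getLast? with
    | none => (stack, temp)   -- Python's stack[-1] would raise here; unreachable since c ∈ stack
    | some t =>
      if c ≠ t then relocLoop f c stack.dropLast (temp ++ [t])
      else (stack, temp)

def stepA (stack : List Char) (c : Char) : List Char :=
  if ¬ (c ∈ stack) then stack ++ [c]
  else
    let p := relocLoop stack.length c stack []
    -- stack.pop(); temp.reverse(); stack += temp; stack += [s]
    p.1.dropLast ++ p.2.reverse ++ [c]

def solve (S : String) : String :=
  PySem.Str.join "," ((S.toList.foldl stepA []).map (fun c => String.ofList [c]))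

-- ===== PORT B =====
def stepB (p : List Char × PySem.Set Char) (c : Char) : List Char × PySem.Set Char :=
  if ¬ (PySem.Set.contains p.2 c = true) then (p.1 ++ [c], PySem.Set.add p.2 c) else p

def solve_alt (S : String) : String :=
  let p := S.toList.reverse.foldl stepB ([], PySem.Set.empty)
  PySem.Str.join "," (p.1.reverse.map (fun c => String.ofList [c]))

-- ===== PRECONDITION & SPEC =====
def Spec_solve (S : String) (out : String) : Prop := out = solve_alt S
instance (S : String) (out : String) : Decidable (Spec_solve S out) := by unfold Spec_solve; infer_instance

-- ===== CLAIM (what is proved, stated in full; the proofs are below) =====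
def Claim_equal_solve : Prop := ∀ (S : String), Dom_solve S → Spec_solve S (solve S)

-- ===== LEMMAS AND PROOFS =====

-- B's loop, abstracted: first-seen-from-the-left dedup of r relative to a seen set.
def gDedup (seen : PySem.Set Char) (r : List Char) : List Char :=
  match r with
  | [] => []
  | c :: r => if c ∈ seen then gDedup seen r else c :: gDedup (PySem.Set.add seen c) r

theorem foldB_fst (r : List Char) : ∀ (acc : List Char) (seen : PySem.Set Char),
    (r.foldl stepB (acc, seen)).1 = acc ++ gDedup seen r := by
  induction r with
  | nil => simp [gDedup]
  | cons c r ih =>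
    intro acc seen
    simp only [List.foldl_cons, gDedup]
    by_cases h : c ∈ seen
    · have hc : PySem.Set.contains seen c = true := by
        simp [PySem.Set.contains_eq_listContains, h]
      rw [if_pos h]
      simp only [stepB, hc, not_true_eq_false, ite_false]
      exact ih acc seen
    · have hc : PySem.Set.contains seen c = false := by
        simp [PySem.Set.contains_eq_listContains, h]
      rw [if_neg h]
      simp only [stepB, hc, Bool.false_eq_true, not_false_eq_true, ite_true]
      rw [ih (acc ++ [c]) (PySem.Set.add seen c)]
      simp

theorem gDedup_congr (r : List Char) : ∀ (s t : PySem.Set Char),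
    (∀ x, x ∈ s ↔ x ∈ t) → gDedup s r = gDedup t r := by
  induction r with
  | nil => intro _ _ _; rfl
  | cons c r ih =>
    intro s t hst
    by_cases h : c ∈ s
    · simp [gDedup, h, (hst c).mp h, ih s t hst]
    · have h' : ¬ c ∈ t := fun hc => h ((hst c).mpr hc)
      simp only [gDedup, if_neg h, if_neg h']
      congr 1
      exact ih _ _ (by intro x; simp [PySem.Set.mem_add, hst x])

theorem not_mem_of_mem_gDedup (r : List Char) : ∀ (s : PySem.Set Char) (x : Char),
    x ∈ gDedup s r → ¬ x ∈ s := by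
  induction r with
  | nil => simp [gDedup]
  | cons c r ih =>
    intro s x hx
    by_cases h : c ∈ s
    · exact ih s x (by simpa [gDedup, h] using hx)
    · simp only [gDedup, h, if_neg, not_false_iff, List.mem_cons] at hx
      rcases hx with rfl | hx
      · exact h
      · intro hxs
        exact ih _ x hx (by simp [PySem.Set.mem_add, hxs])

theorem nodup_gDedup (r : List Char) : ∀ (s : PySem.Set Char), (gDedup s r).Nodup := by
  induction r with
  | nil => intro _; simp [gDedup]
  | cons c r ih =>
    intro s
    by_cases h : c ∈ s
    · simpa [gDedup, h] using ih s
    · simp only [gDedup, h, if_neg, not_false_iff, List.nodup_cons]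
      refine ⟨fun hc => ?_, ih _⟩
      exact not_mem_of_mem_gDedup r _ c hc (by simp [PySem.Set.mem_add])

theorem gDedup_add (r : List Char) : ∀ (s : PySem.Set Char) (c : Char),
    gDedup (PySem.Set.add s c) r = (gDedup s r).filter (fun x => x ≠ c) := by
  induction r with
  | nil => intro _ _; rfl
  | cons d r ih =>
    intro s c
    by_cases hds : d ∈ s
    · have : d ∈ PySem.Set.add s c := by simp [PySem.Set.mem_add, hds]
      simp [gDedup, hds, this, ih]
    · by_cases hdc : d = c
      · subst hdc
        have hmem : d ∈ PySem.Set.add s d := by simp [PySem.Set.mem_add]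
        simp only [gDedup, hds, hmem, if_pos, if_neg, not_false_iff]
        rw [ih s d]
        simp [List.filter_filter]
      · have hnm : ¬ d ∈ PySem.Set.add s c := by
          simp [PySem.Set.mem_add, hds, hdc]
        simp only [gDedup, hds, hnm, if_neg, not_false_iff, List.filter_cons]
        have : (d ≠ c) = True := by simp [hdc]
        simp only [hdc, ne_eq, not_false_eq_true, decide_true, if_pos]
        refine congrArg _ ?_
        rw [gDedup_congr r (PySem.Set.add (PySem.Set.add s c) d)
              (PySem.Set.add (PySem.Set.add s d) c)
              (by intro x; simp [PySem.Set.mem_add]; tauto)]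
        exact ih (PySem.Set.add s d) c

-- the while loop pops the suffix v (which does not contain c) into temp
theorem relocLoop_eq (c : Char) (v : List Char) : c ∉ v →
    ∀ (u temp : List Char) (fuel : Nat), v.length < fuel →
      relocLoop fuel c (u ++ c :: v) temp = (u ++ [c], temp ++ v.reverse) := by
  induction v using List.reverseRecOn with
  | nil =>
    intro _ u temp fuel hf
    match fuel, hf with
    | Nat.succ f, _ =>
      simp [relocLoop]
  | append_singleton v' t ih =>
    intro hc u temp fuel hf
    have hct : c ≠ t := by simp at hc; tauto
    have hcv' : c ∉ v' := by simp at hc; tauto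
    match fuel, hf with
    | Nat.succ f, hf =>
      have hst : u ++ c :: (v' ++ [t]) = (u ++ c :: v') ++ [t] := by simp
      rw [hst]
      simp only [relocLoop, List.getLast?_concat, hct, if_pos, ne_eq, not_false_iff,
        List.dropLast_concat]
      rw [ih hcv' u (temp ++ [t]) f (by simp at hf ⊢; omega)]
      simp

theorem stepA_eq (stack : List Char) (c : Char) (hnd : stack.Nodup) :
    stepA stack c = stack.filter (fun x => x ≠ c) ++ [c] := by
  by_cases hc : c ∈ stack
  · obtain ⟨u, v, rfl⟩ := List.append_of_mem hc
    have hcu : c ∉ u ∧ c ∉ v := by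
      simp [List.nodup_append] at hnd
      exact ⟨fun hcu => (hnd.2.2 c hcu).1 rfl, hnd.2.1.1⟩
    have hlen : v.length < (u ++ c :: v).length := by simp; omega
    simp only [stepA, hc, not_true_eq_false, if_neg, not_false_iff]
    rw [relocLoop_eq c v hcu.2 u [] _ hlen]
    simp only [List.dropLast_concat, List.nil_append, List.reverse_reverse]
    rw [List.filter_append, List.filter_cons]
    have h1 : u.filter (fun x => x ≠ c) = u := by
      rw [List.filter_eq_self]; intro a ha; simp; rintro rfl; exact hcu.1 ha
    have h2 : v.filter (fun x => x ≠ c) = v := by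
      rw [List.filter_eq_self]; intro a ha; simp; rintro rfl; exact hcu.2 ha
    rw [h1, h2]
    simp
  · have h1 : stack.filter (fun x => x ≠ c) = stack := by
      rw [List.filter_eq_self]; intro a ha; simp; rintro rfl; exact hc ha
    simp only [stepA]
    rw [if_pos hc, h1]

theorem foldA_eq (l : List Char) :
    l.foldl stepA [] = (gDedup PySem.Set.empty l.reverse).reverse := by
  induction l using List.reverseRecOn with
  | nil => rfl
  | append_singleton l c ih =>
    rw [List.foldl_append]
    simp only [List.foldl_cons, List.foldl_nil]
    have hnd : (l.foldl stepA []).Nodup := by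
      rw [ih]; exact List.nodup_reverse.mpr (nodup_gDedup _ _)
    rw [stepA_eq _ c hnd, ih]
    have : (l ++ [c]).reverse = c :: l.reverse := by simp
    rw [this]
    have hce : ¬ c ∈ (PySem.Set.empty : PySem.Set Char) := by simp [PySem.Set.empty]
    simp only [gDedup, hce, if_neg, not_false_iff, List.reverse_cons]
    rw [gDedup_add, ← List.filter_reverse]

-- ===== VERDICT (by name: the statement is the Claim_ definition above) =====
theorem solve_spec : Claim_equal_solve := by
  intro S _
  unfold Spec_solve
  simp only [solve, solve_alt]
  rw [foldA_eq, foldB_fst]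
  simp
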